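-- pv_equiv track=rewrite | github.com/HabibEbrahimi2025/LeetCodePractice | GraphLeetCode/MinBridgeToConnectAll.py | minPathToConnectAll
-- ===== SOURCE A (Python) =====
-- from collections import defaultdict
--
-- def minPathToConnectAll(graphlist):
--     graph=defaultdict(list)
--     inDegree=defaultdict(lambda:0)
--     for u,v in graphlist:
--         graph[u].append(v)
--         inDegree[v]+=1
--     for x, y in graphlist:
--         if x not in inDegree:
--             inDegree[x]=0
--     total=0
--     for key, value in inDegree.items():
--         if value==0:
--             total+=1
--     return total
-- ===== SOURCE B (Python) =====
-- def minPathToConnectAll(graphlist):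
--     dests = sorted(v for _, v in graphlist)
--
--     def absent(x):
--         lo, hi = 0, len(dests)
--         while lo < hi:
--             mid = (lo + hi) // 2
--             if dests[mid] < x:
--                 lo = mid + 1
--             else:
--                 hi = mid
--         return lo == len(dests) or dests[lo] != x
--
--     total = 0
--     seen = set()
--     for u, _ in graphlist:
--         if u not in seen:
--             seen.add(u)
--             if absent(u):
--                 total += 1
--     return total
-- ===== Notes on version B (the rewrite author's own statement) =====
-- stated objective: alternative
-- what changed: Replaces A's in-degree counting dict, key-backfill loop and zero-value scan with a sort-then-binary-search algorithm: sort all destination endpoints once, then count each first-seen source whose binary search in the sorted destinations finds no match.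
import Mathlib
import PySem

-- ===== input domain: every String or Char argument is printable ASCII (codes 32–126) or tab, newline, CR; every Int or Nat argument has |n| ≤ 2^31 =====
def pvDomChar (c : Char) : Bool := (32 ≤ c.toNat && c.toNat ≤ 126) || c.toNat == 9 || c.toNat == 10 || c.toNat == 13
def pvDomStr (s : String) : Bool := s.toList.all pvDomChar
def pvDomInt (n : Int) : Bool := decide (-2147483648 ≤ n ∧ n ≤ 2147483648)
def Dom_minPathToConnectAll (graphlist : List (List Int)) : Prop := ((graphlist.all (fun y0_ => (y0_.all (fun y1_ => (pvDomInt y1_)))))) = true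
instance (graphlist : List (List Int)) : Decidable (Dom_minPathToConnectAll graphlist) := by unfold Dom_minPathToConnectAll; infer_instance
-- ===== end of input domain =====

-- B replaces A's in-degree dict, backfill loop and zero-value scan by sorting the destination
-- endpoints once and binary-searching each first-seen source in them (objective: alternative).

-- ===== PORT A =====
-- literal port of A: one loop building (graph, inDegree), a backfill loop, then a zero-value scan
def minPathToConnectAll (graphlist : List (List Int)) : Int :=
  let st := graphlist.foldl
    (fun (s : PySem.Dict Int (List Int) × PySem.Dict Int Int) l =>
      match l with
      | [u, v] => (s.1.modify u [] (fun xs => xs ++ [v]), s.2.modify v 0 (fun n => n + 1))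
      | _ => s)  -- Python raises ValueError here (unpacking); excluded by Pre_
    (PySem.Dict.empty, PySem.Dict.empty)
  let inDegree := graphlist.foldl
    (fun (d : PySem.Dict Int Int) l =>
      match l with
      | [x, _] => if d.contains x then d else d.insert x 0
      | _ => d)  -- Python raises ValueError here; excluded by Pre_
    st.2
  inDegree.items.foldl (fun total kv => if kv.2 = 0 then total + 1 else total) 0

-- ===== PORT B =====
-- B-side helpers: the 'u' and 'v' of the unpacking 'for u, v in graphlist' (pair-shaped lists)
def pvFst (l : List Int) : Int := l.getD 0 0
def pvSnd (l : List Int) : Int := l.getD 1 0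

-- the while-loop of Source B's 'absent': lower-bound binary search on the sorted list
def pvBsearch (ds : List Int) (x : Int) (lo hi : Nat) : Nat :=
  if _h : lo < hi then
    let mid := (lo + hi) / 2
    if ds.getD mid 0 < x then pvBsearch ds x (mid + 1) hi
    else pvBsearch ds x lo mid
  else lo
termination_by hi - lo
decreasing_by all_goals omega

-- Source B's 'absent(x)': binary search, then 'lo == len(dests) or dests[lo] != x'
def pvAbsent (ds : List Int) (x : Int) : Bool :=
  let lo := pvBsearch ds x 0 ds.length
  decide (lo = ds.length) || !(ds.getD lo 0 == x)

def minPathToConnectAll_alt (graphlist : List (List Int)) : Int :=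
  let dests := PySem.List.sorted (graphlist.map pvSnd) (fun x => x) false
  let st := graphlist.foldl
    (fun (s : PySem.Set Int × Int) l =>
      let u := pvFst l
      if s.1.contains u then s
      else (s.1.add u, if pvAbsent dests u then s.2 + 1 else s.2))
    (PySem.Set.empty, 0)
  st.2

-- ===== PRECONDITION & SPEC =====
-- Pre_ excludes exactly the inputs where Python A raises ValueError: an inner list that is not a pair.
def Pre_minPathToConnectAll (graphlist : List (List Int)) : Prop :=
  ∀ l ∈ graphlist, l.length = 2
instance (graphlist : List (List Int)) : Decidable (Pre_minPathToConnectAll graphlist) := by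
  unfold Pre_minPathToConnectAll; infer_instance
def pvWitness_minPathToConnectAll : List (List Int) := [[1, 2], [2, 3], [4, 4]]

def Spec_minPathToConnectAll (graphlist : List (List Int)) (out : Int) : Prop := out = minPathToConnectAll_alt graphlist
instance (graphlist : List (List Int)) (out : Int) : Decidable (Spec_minPathToConnectAll graphlist out) := by unfold Spec_minPathToConnectAll; infer_instance

-- ===== CLAIM (what is proved, stated in full; the proofs are below) =====
def Claim_equal_minPathToConnectAll : Prop := ∀ (graphlist : List (List Int)), Dom_minPathToConnectAll graphlist → Pre_minPathToConnectAll graphlist → Spec_minPathToConnectAll graphlist (minPathToConnectAll graphlist)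

-- ===== LEMMAS AND PROOFS =====
-- the backfill loop (setdefault-shaped) never changes any getD … 0 lookup
lemma getD_backfill (l : List (List Int)) (d : PySem.Dict Int Int) (k : Int) :
    (l.foldl (fun d x => if d.contains (pvFst x) then d else d.insert (pvFst x) 0) d).getD k 0
      = d.getD k 0 := by
  induction l generalizing d with
  | nil => rfl
  | cons x xs ih =>
    simp only [List.foldl_cons]
    by_cases h : d.contains (pvFst x)
    · simp [h, ih]
    · simp only [h, if_false, Bool.false_eq_true, ih]
      rw [PySem.Dict.getD_insert]
      split_ifs with hk
      · subst hk; rw [PySem.Dict.getD_of_not_contains _ _ (by simpa using h)]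
      · rfl

-- the backfill loop appends the new sources to the key list
lemma keys_backfill (l : List (List Int)) (d : PySem.Dict Int Int) :
    (l.foldl (fun d x => if d.contains (pvFst x) then d else d.insert (pvFst x) 0) d).keys
      = PySem.Set.update d.keys (l.map pvFst) := by
  induction l generalizing d with
  | nil => rfl
  | cons x xs ih =>
    simp only [List.foldl_cons, List.map_cons, PySem.Set.update_cons]
    by_cases h : d.contains (pvFst x)
    · rw [if_pos h, ih, PySem.Set.add_of_mem (by simpa [PySem.Dict.contains_iff_mem_keys] using h)]
    · rw [if_neg h, ih, PySem.Dict.keys_insert_of_not_contains _ _ (by simpa using h),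
        PySem.Set.add_of_not_mem (by simpa [PySem.Dict.contains_iff_mem_keys] using h)]

lemma nodup_keys_backfill (l : List (List Int)) (d : PySem.Dict Int Int) (h : d.keys.Nodup) :
    (l.foldl (fun d x => if d.contains (pvFst x) then d else d.insert (pvFst x) 0) d).keys.Nodup := by
  rw [keys_backfill]; exact PySem.Set.nodup_update _ _ h

-- invariant of the binary-search loop: the result splits ds into a strict-below-x prefix and an ≥-x suffix
lemma bsearch_inv (ds : List Int) (x : Int)
    (hs : ∀ i j, i ≤ j → j < ds.length → ds.getD i 0 ≤ ds.getD j 0)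
    (lo hi : Nat) (h1 : lo ≤ hi) (h2 : hi ≤ ds.length)
    (h3 : ∀ i, i < lo → ds.getD i 0 < x)
    (h4 : ∀ i, hi ≤ i → i < ds.length → x ≤ ds.getD i 0) :
    lo ≤ pvBsearch ds x lo hi ∧ pvBsearch ds x lo hi ≤ ds.length ∧
      (∀ i, i < pvBsearch ds x lo hi → ds.getD i 0 < x) ∧
      (∀ i, pvBsearch ds x lo hi ≤ i → i < ds.length → x ≤ ds.getD i 0) := by
  unfold pvBsearch
  by_cases h : lo < hi
  · rw [dif_pos h]
    by_cases hm : ds.getD ((lo + hi) / 2) 0 < x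
    · rw [if_pos hm]
      have := bsearch_inv ds x hs ((lo + hi) / 2 + 1) hi (by omega) h2
        (fun i hi' => lt_of_le_of_lt (hs i ((lo + hi) / 2) (by omega) (by omega)) hm) h4
      exact ⟨by omega, this.2⟩
    · rw [if_neg hm]
      have := bsearch_inv ds x hs lo ((lo + hi) / 2) (by omega) (by omega) h3
        (fun i hle hilen => le_trans (not_lt.mp hm) (hs ((lo + hi) / 2) i hle hilen))
      exact ⟨this.1, by omega, this.2.2⟩
  · rw [dif_neg h]
    exact ⟨le_refl lo, by omega, h3, fun i hle hilen => h4 i (by omega) hilen⟩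
termination_by hi - lo
decreasing_by all_goals omega

-- on a sorted list, Source B's 'absent' decides non-membership
lemma pvAbsent_iff (ds : List Int) (x : Int) (hp : ds.Pairwise (· ≤ ·)) :
    pvAbsent ds x = true ↔ x ∉ ds := by
  have hs : ∀ i j, i ≤ j → j < ds.length → ds.getD i 0 ≤ ds.getD j 0 := by
    intro i j hij hj
    rcases Nat.eq_or_lt_of_le hij with rfl | hlt
    · exact le_refl _
    · rw [List.getD_eq_getElem ds 0 (by omega), List.getD_eq_getElem ds 0 hj]
      exact List.pairwise_iff_getElem.mp hp i j (by omega) hj hlt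
  obtain ⟨hr1, hr2, hr3, hr4⟩ := bsearch_inv ds x hs 0 ds.length (Nat.zero_le _) (le_refl _)
    (fun i hi => absurd hi (Nat.not_lt_zero i)) (fun i hle hilen => absurd hilen (by omega))
  set r := pvBsearch ds x 0 ds.length with hr
  unfold pvAbsent
  rw [← hr]
  constructor
  · intro habs hmem
    obtain ⟨j, hj, hjx⟩ := List.mem_iff_getElem.mp hmem
    have hjr : r ≤ j := by
      by_contra hc
      have := hr3 j (by omega)
      rw [List.getD_eq_getElem ds 0 hj, hjx] at this
      exact lt_irrefl x this
    have hrlen : r < ds.length := by omega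
    have hge : x ≤ ds.getD r 0 := hr4 r (le_refl r) hrlen
    have hle' : ds.getD r 0 ≤ ds.getD j 0 := hs r j hjr hj
    rw [List.getD_eq_getElem ds 0 hj, hjx] at hle'
    have heq : ds.getD r 0 = x := le_antisymm hle' hge
    simp only [decide_eq_true_eq, Bool.or_eq_true, Bool.not_eq_true', beq_eq_false_iff_ne,
      ne_eq] at habs
    rcases habs with h | h
    · omega
    · exact h heq
  · intro hnm
    by_cases hrl : r = ds.length
    · simp [hrl]
    · have hrlen : r < ds.length := by omega
      have : ds.getD r 0 ∈ ds := by
        rw [List.getD_eq_getElem ds 0 hrlen]; exact List.getElem_mem hrlen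
      have hne : ds.getD r 0 ≠ x := fun he => hnm (he ▸ this)
      rw [List.getD_eq_getElem?_getD] at hne
      simp [hrl, hne]

-- Source B's main loop: fold over the edges with a (seen, total) state counts, via countP,
-- the first-occurrence sources outside 'seen' that satisfy p
lemma loopB (p : Int → Bool) (l : List (List Int)) (seen : PySem.Set Int) (total : Int) :
    (l.foldl
      (fun (s : PySem.Set Int × Int) x =>
        if s.1.contains (pvFst x) then s
        else (s.1.add (pvFst x), if p (pvFst x) then s.2 + 1 else s.2))
      (seen, total)).2
    = total + ((PySem.Set.ofList (l.map pvFst)).countP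
        (fun y => p y && !seen.contains y) : Nat) := by
  induction l generalizing seen total with
  | nil => simp
  | cons x xs ih =>
    simp only [List.foldl_cons, List.map_cons, PySem.Set.ofList_cons, List.countP_cons,
      PySem.Set.discard, List.countP_filter]
    by_cases h : seen.contains (pvFst x) = true
    · rw [if_pos h, ih]
      have h1 : (p (pvFst x) && !seen.contains (pvFst x)) = false := by rw [h]; simp
      have h2 : List.countP (fun a => (p a && !seen.contains a) && !(a == pvFst x))
            (PySem.Set.ofList (xs.map pvFst))
          = List.countP (fun y => p y && !seen.contains y) (PySem.Set.ofList (xs.map pvFst)) := by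
        apply List.countP_congr
        intro y _
        by_cases hy : y = pvFst x
        · subst hy; rw [h]; simp
        · simp [hy]
      rw [h1, h2]; simp
    · have h' : seen.contains (pvFst x) = false := by simpa using h
      have hmem : pvFst x ∉ seen := by
        intro hc
        rw [(PySem.Set.contains_iff seen (pvFst x)).mpr hc] at h'
        exact absurd h' (by decide)
      rw [if_neg (by simp [hmem]), ih]
      have h1 : (p (pvFst x) && !seen.contains (pvFst x)) = p (pvFst x) := by rw [h']; simp
      have h2 : List.countP (fun y => p y && !(seen.add (pvFst x)).contains y)
            (PySem.Set.ofList (xs.map pvFst))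
          = List.countP (fun a => (p a && !seen.contains a) && !(a == pvFst x))
            (PySem.Set.ofList (xs.map pvFst)) := by
        apply List.countP_congr
        intro y _
        by_cases hy : y = pvFst x
        · subst hy
          have hc : (seen.add (pvFst x)).contains (pvFst x) = true := by
            rw [PySem.Set.contains_iff]; exact (PySem.Set.mem_add _ _ _).mpr (Or.inr rfl)
          rw [hc]; simp
        · have hc : (seen.add (pvFst x)).contains y = seen.contains y := by
            by_cases hys : y ∈ seen
            · rw [(PySem.Set.contains_iff _ _).mpr ((PySem.Set.mem_add _ _ _).mpr (Or.inl hys)),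
                (PySem.Set.contains_iff _ _).mpr hys]
            · have a1 : (seen.add (pvFst x)).contains y = false := by
                rw [Bool.eq_false_iff]; intro hcon
                rcases (PySem.Set.mem_add _ _ _).mp ((PySem.Set.contains_iff _ _).mp hcon) with hm | hm
                · exact hys hm
                · exact hy hm
              have a2 : seen.contains y = false := by
                rw [Bool.eq_false_iff]; intro hcon; exact hys ((PySem.Set.contains_iff _ _).mp hcon)
              rw [a1, a2]
          rw [hc]; simp [hy]
      rw [h1, h2]
      by_cases hp : p (pvFst x) <;> simp [hp] <;> push_cast <;> ring

-- ===== VERDICT =====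
theorem minPathToConnectAll_spec : Claim_equal_minPathToConnectAll := by
  intro graphlist _hdom hpre
  unfold Spec_minPathToConnectAll minPathToConnectAll minPathToConnectAll_alt
  -- name source/destination lists
  set S : List Int := graphlist.map pvFst with hS
  set T : List Int := graphlist.map pvSnd with hT
  -- first loop: congruence to projection form, then split the pair state
  have h1 : graphlist.foldl
      (fun (s : PySem.Dict Int (List Int) × PySem.Dict Int Int) l =>
        match l with
        | [u, v] => (s.1.modify u [] (fun xs => xs ++ [v]), s.2.modify v 0 (fun n => n + 1))
        | _ => s)
      (PySem.Dict.empty, PySem.Dict.empty)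
      = graphlist.foldl
        (fun s l => (s.1.modify (pvFst l) [] (fun xs => xs ++ [pvSnd l]),
                     s.2.modify (pvSnd l) 0 (fun n => n + 1)))
        (PySem.Dict.empty, PySem.Dict.empty) := by
    apply PySem.List.foldl_congr_mem
    intro acc x hx
    obtain ⟨a, b, rfl⟩ : ∃ a b, x = [a, b] := by
      have := hpre x hx
      match x, this with | [a, b], _ => exact ⟨a, b, rfl⟩
    rfl
  -- second component is Counter(T)
  have h2 : (graphlist.foldl
      (fun (s : PySem.Dict Int (List Int) × PySem.Dict Int Int) l =>
        (s.1.modify (pvFst l) [] (fun xs => xs ++ [pvSnd l]), s.2.modify (pvSnd l) 0 (fun n => n + 1)))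
      (PySem.Dict.empty, PySem.Dict.empty)).2 = PySem.Dict.counter T := by
    rw [PySem.List.foldl_prod_mk
        (fun (d : PySem.Dict Int (List Int)) l => d.modify (pvFst l) [] (fun xs => xs ++ [pvSnd l]))
        (fun (d : PySem.Dict Int Int) l => d.modify (pvSnd l) 0 (fun n => n + 1)),
      PySem.Dict.counter_eq_foldl, hT, List.foldl_map]
  -- backfill loop: congruence to projection form
  have h3 : ∀ (d : PySem.Dict Int Int), graphlist.foldl
      (fun (d : PySem.Dict Int Int) l =>
        match l with
        | [x, _] => if d.contains x then d else d.insert x 0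
        | _ => d) d
      = graphlist.foldl (fun d x => if d.contains (pvFst x) then d else d.insert (pvFst x) 0) d := by
    intro d
    apply PySem.List.foldl_congr_mem
    intro acc x hx
    obtain ⟨a, b, rfl⟩ : ∃ a b, x = [a, b] := by
      have := hpre x hx
      match x, this with | [a, b], _ => exact ⟨a, b, rfl⟩
    rfl
  simp only [h1, h2, h3]
  set D2 := graphlist.foldl (fun (d : PySem.Dict Int Int) x =>
      if d.contains (pvFst x) then d else d.insert (pvFst x) 0) (PySem.Dict.counter T) with hD2
  have hnd : D2.keys.Nodup := nodup_keys_backfill _ _ (PySem.Dict.nodup_keys_counter T)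
  -- the zero-scan is a countP over the items
  have h4 : List.foldl (fun (total : Int) (kv : Int × Int) => if kv.2 = 0 then total + 1 else total) 0 D2.items
      = 0 + ((D2.items.countP (fun kv => decide (kv.2 = 0)) : Nat) : Int) := by
    rw [← PySem.List.foldl_count_if]
    apply PySem.List.foldl_congr_mem
    intro acc x _
    by_cases hx2 : x.2 = 0 <;> simp [hx2]
  rw [h4]
  rw [PySem.Dict.items_eq_map_keys D2 hnd 0]
  -- every lookup in D2 is T.count
  have hget : ∀ k, D2.getD k 0 = (T.count k : Int) := by
    intro k
    rw [hD2, getD_backfill, PySem.Dict.getD_counter]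
  have hkeys : D2.keys = PySem.Set.update (PySem.Set.ofList T) S := by
    rw [hD2, keys_backfill, PySem.Dict.keys_counter]
  -- count zeros over the keys
  rw [List.countP_map]
  have hcnt : List.countP ((fun kv : Int × Int => decide (kv.2 = 0)) ∘ (fun k => (k, D2.getD k 0))) D2.keys
      = List.countP (fun k => decide (k ∉ T)) D2.keys := by
    apply List.countP_congr
    intro k _
    simp only [Function.comp, hget k]
    by_cases hkT : k ∈ T
    · have hne : T.count k ≠ 0 := Nat.pos_iff_ne_zero.mp (List.count_pos_iff.mpr hkT)
      simp [hkT, hne]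
    · simp [hkT, List.count_eq_zero_of_not_mem hkT]
  rw [hcnt, hkeys, PySem.Set.update_eq_append_filter, List.countP_append]
  have hleft : List.countP (fun k => decide (k ∉ T)) (PySem.Set.ofList T) = 0 := by
    rw [List.countP_eq_zero]
    intro k hk
    simp [(PySem.Set.mem_ofList T k).mp hk]
  rw [hleft]
  -- B's side: the seen-set loop counts, over the deduped sources, those 'absent' from the sorted dests
  rw [loopB (pvAbsent (PySem.List.sorted T (fun x => x) false)) graphlist PySem.Set.empty 0]
  have hB : (PySem.Set.ofList S).countP
        (fun y => pvAbsent (PySem.List.sorted T (fun x => x) false) y && !PySem.Set.contains PySem.Set.empty y)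
      = List.countP (fun y => decide (y ∉ T)) (List.filter (fun y => !(PySem.Set.ofList T).contains y) (PySem.Set.ofList S)) := by
    rw [List.countP_filter]
    apply List.countP_congr
    intro y _
    have hemp : PySem.Set.contains PySem.Set.empty y = false := by
      simp [PySem.Set.contains_iff, PySem.Set.empty]
    have habs : pvAbsent (PySem.List.sorted T (fun x => x) false) y = true ↔ y ∉ T := by
      rw [pvAbsent_iff _ _ (PySem.List.sorted_pairwise T (fun x => x))]
      simp [PySem.List.mem_sorted]
    by_cases hy : y ∈ T
    · have h5 : (PySem.Set.ofList T).contains y = true := by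
        simp [PySem.Set.contains_iff, PySem.Set.mem_ofList, hy]
      simp [hemp, habs, hy, h5]
    · have h5 : (PySem.Set.ofList T).contains y = false := by
        simp only [Bool.eq_false_iff]
        intro hc
        exact hy ((PySem.Set.mem_ofList T y).mp ((PySem.Set.contains_iff _ _).mp hc))
      simp [hemp, habs, hy, h5]
  rw [hB]
  push_cast
  ring
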